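-- pv_equiv track=rewrite | github.com/raeez/chiral-bar-cobar | compute/lib/cy_mathieu_moonshine_engine.py | _m24_decomposition_exists
-- ===== SOURCE A (Python) =====
-- M24_IRREP_DIMS = [
--     1, 23, 45, 45, 231, 231, 252, 253, 483, 770, 770,
--     990, 990, 1035, 1035, 1035, 1265, 1771, 2024, 2277,
--     3312, 3520, 5313, 5544, 5796, 10395,
-- ]
--
-- def _m24_decomposition_exists(target: int) -> bool:
--     """Check if target is a non-negative integer combination of M24 irrep dims."""
--     if target == 0:
--         return True
--     if target < 0:
--         return False
--     dims = sorted(set(M24_IRREP_DIMS))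
--     # BFS/subset-sum check (bounded by target)
--     achievable = {0}
--     for d in dims:
--         if d > target:
--             continue
--         new = set()
--         for v in achievable:
--             k = 0
--             while v + k * d <= target:
--                 new.add(v + k * d)
--                 k += 1
--                 if k > target // d + 1:
--                     break
--         achievable |= new
--     return target in achievable
-- ===== SOURCE B (Python) =====
-- M24_IRREP_DIMS = [
--     1, 23, 45, 45, 231, 231, 252, 253, 483, 770, 770,
--     990, 990, 1035, 1035, 1035, 1265, 1771, 2024, 2277,
--     3312, 3520, 5313, 5544, 5796, 10395,
-- ]
--
-- def _m24_decomposition_exists(target: int) -> bool: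
--     """Check if target is a non-negative integer combination of M24 irrep dims.
--
--     Since the dimension 1 is among the irrep dims, every non-negative integer
--     is a non-negative combination (target copies of the trivial irrep)."""
--     return target >= 0
-- ===== Notes on version B (the rewrite author's own statement) =====
-- stated objective: faster
-- what changed: Replaced the bounded subset-sum BFS over achievable sums with the closed form 'target >= 0', valid because the dimension 1 (the trivial irrep) is in the list, so every non-negative integer is a non-negative combination.
import Mathlib
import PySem

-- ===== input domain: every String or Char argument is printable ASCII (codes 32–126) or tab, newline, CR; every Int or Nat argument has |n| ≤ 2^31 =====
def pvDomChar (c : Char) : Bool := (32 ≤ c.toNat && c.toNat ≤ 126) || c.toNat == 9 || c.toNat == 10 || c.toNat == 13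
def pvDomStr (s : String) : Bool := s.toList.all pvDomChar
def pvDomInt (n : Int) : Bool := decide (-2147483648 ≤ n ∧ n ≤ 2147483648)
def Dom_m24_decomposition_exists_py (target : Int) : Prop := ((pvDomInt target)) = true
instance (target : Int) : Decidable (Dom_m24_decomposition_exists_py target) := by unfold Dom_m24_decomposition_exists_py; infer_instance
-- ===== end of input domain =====

-- B replaces A's bounded subset-sum BFS by the closed form 'target >= 0' (valid because dimension 1 is in the list); objective: faster.

-- ===== PORT A =====
def pvM24_IRREP_DIMS : List Int :=
  [1, 23, 45, 45, 231, 231, 252, 253, 483, 770, 770,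
   990, 990, 1035, 1035, 1035, 1265, 1771, 2024, 2277,
   3312, 3520, 5313, 5544, 5796, 10395]

-- Python's 'set' of ints is modelled by Std.HashSet Int (a hash set, like CPython's): every
-- consumption below is order-independent (building sets, union, membership), exactly as in A.
-- The inner 'while v + k * d <= target: ...' loop; fuel bounds the iteration count
-- (target // d + 2 iterations suffice: the defensive 'if k > target // d + 1: break' caps k).
def pvWhile (target d v : Int) (k : Int) (s : Std.HashSet Int) : Nat → Std.HashSet Int
  | 0 => s
  | fuel + 1 =>
    if v + k * d ≤ target then
      let s' := s.insert (v + k * d)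
      let k' := k + 1
      if k' > PySem.Int.floordiv target d + 1 then s'
      else pvWhile target d v k' s' fuel
    else s

def m24_decomposition_exists_py (target : Int) : Bool :=
  if target = 0 then true
  else if target < 0 then false
  else
    let dims := PySem.List.sorted (PySem.Set.ofList pvM24_IRREP_DIMS) (fun x => x) false
    let achievable : Std.HashSet Int := (∅ : Std.HashSet Int).insert 0
    let achievable := dims.foldl (fun ach d =>
      if d > target then ach
      else
        let new := ach.toList.foldl
          (fun new v => pvWhile target d v 0 new ((PySem.Int.floordiv target d + 2).toNat + 1))
          (∅ : Std.HashSet Int)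
        new.toList.foldl (fun a y => a.insert y) ach) achievable
    achievable.contains target

-- ===== PORT B =====
def m24_decomposition_exists_py_alt (target : Int) : Bool := decide (target ≥ 0)

-- ===== PRECONDITION & SPEC =====
def Spec_m24_decomposition_exists_py (target : Int) (out : Bool) : Prop := out = m24_decomposition_exists_py_alt target
instance (target : Int) (out : Bool) : Decidable (Spec_m24_decomposition_exists_py target out) := by unfold Spec_m24_decomposition_exists_py; infer_instance

-- ===== CLAIM (what is proved, stated in full; the proofs are below) =====
def Claim_equal_m24_decomposition_exists_py : Prop := ∀ (target : Int), Dom_m24_decomposition_exists_py target → Spec_m24_decomposition_exists_py target (m24_decomposition_exists_py target)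

-- ===== LEMMAS AND PROOFS =====

-- membership in the accumulator is preserved by the while loop
theorem pvWhile_mono (target d v k : Int) (s : Std.HashSet Int) (fuel : Nat)
    {x : Int} (hx : x ∈ s) : x ∈ pvWhile target d v k s fuel := by
  induction fuel generalizing k s with
  | zero => exact hx
  | succ f ih =>
    simp only [pvWhile]
    split
    · split
      · exact Std.HashSet.mem_insert.2 (Or.inr hx)
      · exact ih _ _ (Std.HashSet.mem_insert.2 (Or.inr hx))
    · exact hx

-- with d = 1 and v = 0, the while loop reaches target (for 0 ≤ k ≤ target, enough fuel)
theorem pvWhile_hits (target : Int) (k : Int) (s : Std.HashSet Int) (fuel : Nat)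
    (h0 : 0 ≤ k) (hk : k ≤ target) (hf : (target - k).toNat + 1 ≤ fuel) :
    target ∈ pvWhile target 1 0 k s fuel := by
  induction fuel generalizing k s with
  | zero => omega
  | succ f ih =>
    simp only [pvWhile]
    have hdiv : PySem.Int.floordiv target 1 = target := by
      rw [PySem.Int.floordiv_eq_ediv_of_pos (by norm_num)]; simp
    rw [if_pos (by omega)]
    by_cases heq : k = target
    · have hmem : target ∈ s.insert (0 + k * 1) := by
        exact Std.HashSet.mem_insert.2 (Or.inl (by simp only [beq_iff_eq]; omega))
      split
      · exact hmem
      · exact pvWhile_mono _ _ _ _ _ _ hmem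
    · rw [if_neg (by rw [hdiv]; omega)]
      exact ih (k + 1) _ (by omega) (by omega) (by omega)

-- membership preserved by the 'for v in achievable' fold that builds 'new'
theorem pvNewFold_mono (target d : Int) (l : List Int) (s : Std.HashSet Int)
    {x : Int} (hx : x ∈ s) :
    x ∈ l.foldl
      (fun new v => pvWhile target d v 0 new ((PySem.Int.floordiv target d + 2).toNat + 1)) s := by
  induction l generalizing s with
  | nil => exact hx
  | cons v l ih => exact ih _ (pvWhile_mono _ _ _ _ _ _ hx)

-- for d = 1, the 'new' fold reaches target as soon as 0 is among the iterated values
theorem pvNew_hits (target : Int) (ht : 0 ≤ target) (l : List Int) (s : Std.HashSet Int)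
    (h0 : (0 : Int) ∈ l) :
    target ∈ l.foldl
      (fun new v => pvWhile target 1 v 0 new ((PySem.Int.floordiv target 1 + 2).toNat + 1)) s := by
  have hdiv : PySem.Int.floordiv target 1 = target := by
    rw [PySem.Int.floordiv_eq_ediv_of_pos (by norm_num)]; simp
  induction l generalizing s with
  | nil => simp at h0
  | cons v l ih =>
    rcases List.mem_cons.1 h0 with hv | hl
    · simp only [List.foldl_cons]
      apply pvNewFold_mono
      rw [← hv]
      exact pvWhile_hits _ _ _ _ le_rfl ht (by rw [hdiv]; omega)
    · exact ih _ hl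

-- membership preserved by 'achievable |= new' (a fold of inserts)
theorem pvInsertAll_mono (l : List Int) (s : Std.HashSet Int) {x : Int} (hx : x ∈ s) :
    x ∈ l.foldl (fun a y => a.insert y) s := by
  induction l generalizing s with
  | nil => exact hx
  | cons y l ih => exact ih _ (Std.HashSet.mem_insert.2 (Or.inr hx))

-- every inserted element is a member after 'achievable |= new'
theorem pvInsertAll_of_mem (l : List Int) (s : Std.HashSet Int) {x : Int} (hx : x ∈ l) :
    x ∈ l.foldl (fun a y => a.insert y) s := by
  induction l generalizing s with
  | nil => simp at hx
  | cons y l ih =>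
    simp only [List.foldl_cons]
    rcases List.mem_cons.1 hx with hy | hl
    · exact pvInsertAll_mono _ _ (Std.HashSet.mem_insert.2 (Or.inl (beq_iff_eq.2 hy.symm)))
    · exact ih _ hl

-- membership is preserved by the remaining outer-loop iterations
theorem pvFold_mono (target : Int) (ds : List Int) (ach : Std.HashSet Int)
    (hx : target ∈ ach) :
    target ∈ ds.foldl (fun ach d =>
      if d > target then ach
      else
        let new := ach.toList.foldl
          (fun new v => pvWhile target d v 0 new ((PySem.Int.floordiv target d + 2).toNat + 1))
          (∅ : Std.HashSet Int)
        new.toList.foldl (fun a y => a.insert y) ach) ach := by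
  induction ds generalizing ach with
  | nil => exact hx
  | cons d ds ih =>
    simp only [List.foldl]
    split
    · exact ih _ hx
    · exact ih _ (pvInsertAll_mono _ _ hx)

-- ===== VERDICT (by name: the statement is the Claim_ definition above) =====
theorem m24_decomposition_exists_py_spec : Claim_equal_m24_decomposition_exists_py := by
  intro target _
  unfold Spec_m24_decomposition_exists_py m24_decomposition_exists_py m24_decomposition_exists_py_alt
  by_cases h0 : target = 0
  · subst h0; decide
  · rw [if_neg h0]
    by_cases hneg : target < 0
    · rw [if_pos hneg]; simp; omega
    · rw [if_neg hneg]
      have hpos : 1 ≤ target := by omega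
      have hd : PySem.List.sorted (PySem.Set.ofList pvM24_IRREP_DIMS) (fun x => x) false
          = 1 :: [23, 45, 231, 252, 253, 483, 770, 990, 1035, 1265, 1771, 2024, 2277,
                  3312, 3520, 5313, 5544, 5796, 10395] := by decide
      rw [hd]
      simp only []
      rw [List.foldl_cons]
      have hge : decide (target ≥ 0) = true := by simp; omega
      rw [hge]
      refine Std.HashSet.contains_iff_mem.2 (pvFold_mono target _ _ ?_)
      beta_reduce
      rw [if_neg (by omega)]
      have hnew : target ∈ ((∅ : Std.HashSet Int).insert 0).toList.foldl
          (fun new v => pvWhile target 1 v 0 new ((PySem.Int.floordiv target 1 + 2).toNat + 1))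
          (∅ : Std.HashSet Int) := by
        apply pvNew_hits _ (by omega)
        simp [Std.HashSet.mem_toList, Std.HashSet.mem_insert]
      exact pvInsertAll_of_mem _ _ (Std.HashSet.mem_toList.2 hnew)
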